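-- pv_equiv track=rewrite | github.com/xglxia/Decomposing-matrices-as-a-sum-of-two-tripotents-over-a-prime-field | Tripotent_Matrix_Generator.py | list_generator
-- ===== SOURCE A (Python) =====
-- def list_generator(n,p):
--     ist = []
--     if n==1:
--         for i in range(p):
--             ist.append([i])
--         return ist
--     else:
--         for a in list_generator(n-1, p):
--             for b in list_generator(1, p):
--                 ist.append(a+b)
--     return ist
-- ===== SOURCE B (Python) =====
-- def list_generator(n, p):
--     result = [[i] for i in range(p)]
--     for _ in range(n - 1):
--         result = [a + [b] for a in result for b in range(p)]
--     return result
-- ===== Notes on version B (the rewrite author's own statement) =====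
-- stated objective: simpler
-- what changed: Replaces the double recursion (list_generator(n-1) and list_generator(1) recomputed at every level) with a single bottom-up loop that extends each tuple by one coordinate per iteration.
import Mathlib
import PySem

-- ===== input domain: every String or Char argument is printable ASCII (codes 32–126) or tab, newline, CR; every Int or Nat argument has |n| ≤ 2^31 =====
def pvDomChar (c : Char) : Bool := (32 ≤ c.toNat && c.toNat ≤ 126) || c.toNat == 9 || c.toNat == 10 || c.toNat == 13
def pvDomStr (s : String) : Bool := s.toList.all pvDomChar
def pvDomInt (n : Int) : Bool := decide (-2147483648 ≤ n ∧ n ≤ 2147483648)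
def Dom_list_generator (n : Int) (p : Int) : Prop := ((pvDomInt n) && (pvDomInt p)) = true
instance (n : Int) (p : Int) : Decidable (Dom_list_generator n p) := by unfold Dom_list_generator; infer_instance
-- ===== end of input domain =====

-- B replaces A's double recursion by a single bottom-up loop extending each tuple one coordinate per pass (simpler).

-- ===== PORT A =====
def list_generator (n : Int) (p : Int) : List (List Int) :=
  if n = 1 then
    (PySem.List.pyRange 0 p 1).foldl (fun ist i => ist ++ [[i]]) []
  else if n ≤ 1 then
    []  -- Python recurses forever (RecursionError) for n < 1; these inputs are outside Pre_
  else
    (list_generator (n-1) p).foldl (fun ist a =>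
      (list_generator 1 p).foldl (fun ist b => ist ++ [a ++ b]) ist) []
termination_by n.toNat
decreasing_by all_goals omega

-- ===== PORT B =====
def list_generator_alt (n : Int) (p : Int) : List (List Int) :=
  (PySem.List.pyRange 0 (n - 1) 1).foldl
    (fun result _ =>
      result.flatMap (fun a => (PySem.List.pyRange 0 p 1).map (fun b => a ++ [b])))
    ((PySem.List.pyRange 0 p 1).map (fun i => [i]))

-- ===== PRECONDITION & SPEC =====
-- Pre_ excludes n ≤ 0, where A has no base case and raises RecursionError.
def Pre_list_generator (n : Int) (p : Int) : Prop := 1 ≤ n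
instance (n : Int) (p : Int) : Decidable (Pre_list_generator n p) := by unfold Pre_list_generator; infer_instance
def pvWitness_list_generator : Int × Int := (2, 3)

def Spec_list_generator (n : Int) (p : Int) (out : List (List Int)) : Prop := out = list_generator_alt n p
instance (n : Int) (p : Int) (out : List (List Int)) : Decidable (Spec_list_generator n p out) := by unfold Spec_list_generator; infer_instance

-- ===== CLAIM (what is proved, stated in full; the proofs are below) =====
def Claim_equal_list_generator : Prop := ∀ (n : Int) (p : Int), Dom_list_generator n p → Pre_list_generator n p → Spec_list_generator n p (list_generator n p)

-- ===== LEMMAS AND PROOFS =====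

-- one extension pass: every tuple gains one trailing coordinate from range(p)
def pvStep (p : Int) (res : List (List Int)) : List (List Int) :=
  res.flatMap (fun a => (PySem.List.pyRange 0 p 1).map (fun b => a ++ [b]))

def pvBase (p : Int) : List (List Int) := (PySem.List.pyRange 0 p 1).map (fun i => [i])

lemma foldl_ignore_iterate {α β : Type} (f : α → α) :
    ∀ (L : List β) (init : α), L.foldl (fun r _ => f r) init = f^[L.length] init := by
  intro L
  induction L with
  | nil => intro init; simp
  | cons x xs ih =>
      intro init
      simp [List.foldl, ih, Function.iterate_succ_apply]

lemma foldl_app_map {α β : Type} (f : α → β) :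
    ∀ (l : List α) (acc : List β), l.foldl (fun acc x => acc ++ [f x]) acc = acc ++ l.map f := by
  intro l
  induction l with
  | nil => intro acc; simp
  | cons x xs ih => intro acc; simp [List.foldl, ih]

lemma base_eq (p : Int) :
    (PySem.List.pyRange 0 p 1).foldl (fun ist i => ist ++ [[i]]) [] = pvBase p := by
  rw [pvBase]
  simpa using foldl_app_map (fun i : Int => [i]) (PySem.List.pyRange 0 p 1) []

lemma A_eq_iterate : ∀ (m : Nat) (n p : Int), n = (m : Int) + 1 →
    list_generator n p = (pvStep p)^[m] (pvBase p) := by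
  intro m
  induction m with
  | zero =>
      intro n p hn
      have h1 : n = 1 := by omega
      rw [list_generator, if_pos h1, base_eq]
      rfl
  | succ k ih =>
      intro n p hn
      have h1 : ¬ n = 1 := by omega
      have h2 : ¬ n ≤ 1 := by omega
      rw [list_generator]
      rw [if_neg h1, if_neg h2]
      have hA1 : list_generator 1 p = pvBase p := by
        rw [list_generator, if_pos rfl, base_eq]
      have hrec : list_generator (n - 1) p = (pvStep p)^[k] (pvBase p) := by
        apply ih; omega
      have hinner : ∀ (a : List Int) (ist : List (List Int)),
          (list_generator 1 p).foldl (fun ist b => ist ++ [a ++ b]) ist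
            = ist ++ (PySem.List.pyRange 0 p 1).map (fun b => a ++ [b]) := by
        intro a ist
        rw [hA1, pvBase, List.foldl_map]
        exact foldl_app_map (fun b : Int => a ++ [b]) (PySem.List.pyRange 0 p 1) ist
      calc (list_generator (n-1) p).foldl (fun ist a =>
              (list_generator 1 p).foldl (fun ist b => ist ++ [a ++ b]) ist) []
          = (list_generator (n-1) p).foldl (fun ist a =>
              ist ++ (PySem.List.pyRange 0 p 1).map (fun b => a ++ [b])) [] := by
            apply PySem.List.foldl_congr_mem
            intro acc x _
            exact hinner x acc
        _ = [] ++ (list_generator (n-1) p).flatMap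
              (fun a => (PySem.List.pyRange 0 p 1).map (fun b => a ++ [b])) := by
            rw [PySem.List.foldl_append_eq_flatMap]
        _ = (pvStep p)^[k+1] (pvBase p) := by
            rw [hrec, Function.iterate_succ_apply']
            simp [pvStep]

lemma B_eq_iterate (n p : Int) :
    list_generator_alt n p = (pvStep p)^[(n - 1 - 0).toNat] (pvBase p) := by
  rw [list_generator_alt, foldl_ignore_iterate, PySem.List.length_pyRange_one]
  rfl

-- ===== VERDICT (by name: the statement is the Claim_ definition above) =====
theorem list_generator_spec : Claim_equal_list_generator := by
  intro n p _ hpre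
  unfold Spec_list_generator
  rw [B_eq_iterate]
  apply A_eq_iterate
  unfold Pre_list_generator at hpre
  omega
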